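-- pv_equiv track=rewrite | github.com/marmita0010/pcbasic | pcbasic/basic/devices/dosnames.py | dos_normpath
-- ===== SOURCE A (Python) =====
-- def dos_normpath(elements):
--     """Parse internal .. and . in list (like normpath)."""
--     # drop leading . and .. (this is what GW-BASIC does at drive root)
--     i = 0
--     while i < len(elements):
--         if elements[i] == u'.':
--             del elements[i]
--         elif elements[i] == u'..':
--             del elements[i]
--             if i > 0:
--                 del elements[i-1]
--                 i -= 1
--         else:
--             i += 1
--     return elements
-- ===== SOURCE B (Python) =====
-- def dos_normpath(elements):
--     """Parse internal .. and . in list (like normpath)."""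
--     stack = []
--     for e in elements:
--         if e == u'.':
--             pass
--         elif e == u'..':
--             if stack:
--                 stack.pop()
--         else:
--             stack.append(e)
--     elements[:] = stack
--     return elements
-- ===== Notes on version B (the rewrite author's own statement) =====
-- stated objective: alternative
-- what changed: Replaced the index-and-delete while loop (each del shifts the list tail) by a single left-to-right pass maintaining a stack: names are pushed, '.' skipped, '..' pops the stack if nonempty; the same in-place mutation of the argument is kept via elements[:] = stack. Intended as faster (A is quadratic in the worst case); measured ~1.5x on random inputs, not confirmed as faster in a timing run.
import Mathlib
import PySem

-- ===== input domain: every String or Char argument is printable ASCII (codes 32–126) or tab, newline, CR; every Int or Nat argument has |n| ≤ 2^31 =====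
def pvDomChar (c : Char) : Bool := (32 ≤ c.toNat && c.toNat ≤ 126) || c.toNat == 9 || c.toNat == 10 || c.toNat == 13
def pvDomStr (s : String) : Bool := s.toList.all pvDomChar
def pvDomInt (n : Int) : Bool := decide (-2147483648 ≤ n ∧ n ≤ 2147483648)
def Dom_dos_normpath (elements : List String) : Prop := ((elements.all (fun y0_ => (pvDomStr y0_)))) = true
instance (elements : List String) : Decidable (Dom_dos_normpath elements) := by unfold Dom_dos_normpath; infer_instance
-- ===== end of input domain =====

-- B replaces A's index-and-delete while loop by a single stack pass (push names, skip '.', pop on '..');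
-- both Pythons mutate the argument list in place, equivalence proved on the return value.


-- ===== PORT A =====
-- A's while loop: index i, in-place del's; termination measure 2*len - i.
def dosNormpathLoopA (i : Nat) (es : List String) : List String :=
  if h : i < es.length then
    if es[i] = "." then
      dosNormpathLoopA i (es.eraseIdx i)
    else if es[i] = ".." then
      if i > 0 then
        dosNormpathLoopA (i - 1) ((es.eraseIdx i).eraseIdx (i - 1))
      else
        dosNormpathLoopA i (es.eraseIdx i)
    else
      dosNormpathLoopA (i + 1) es
  else es
termination_by 2 * es.length - i
decreasing_by
  · simp only [List.length_eraseIdx_of_lt h]; omega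
  · simp only [List.length_eraseIdx]; split <;> split <;> omega
  · simp only [List.length_eraseIdx_of_lt h]; omega
  · omega

def dos_normpath (elements : List String) : List String :=
  dosNormpathLoopA 0 elements

-- ===== PORT B =====
def dosNormpathStep (stack : List String) (e : String) : List String :=
  if e = "." then stack
  else if e = ".." then stack.dropLast
  else stack ++ [e]

def dos_normpath_alt (elements : List String) : List String :=
  elements.foldl dosNormpathStep []

-- ===== PRECONDITION & SPEC =====
def Spec_dos_normpath (elements : List String) (out : List String) : Prop := out = dos_normpath_alt elements
instance (elements : List String) (out : List String) : Decidable (Spec_dos_normpath elements out) := by unfold Spec_dos_normpath; infer_instance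

-- ===== CLAIM (what is proved, stated in full; the proofs are below) =====
def Claim_equal_dos_normpath : Prop := ∀ (elements : List String), Dom_dos_normpath elements → Spec_dos_normpath elements (dos_normpath elements)

-- ===== LEMMAS AND PROOFS =====

theorem take_eraseIdx_self (es : List String) (i : Nat) (h : i < es.length) :
    (es.eraseIdx i).take i = es.take i := by
  rw [List.eraseIdx_eq_take_drop_succ, List.take_append]
  simp [List.take_take, Nat.le_of_lt h]

theorem drop_eraseIdx_self (es : List String) (i : Nat) (h : i < es.length) :
    (es.eraseIdx i).drop i = es.drop (i+1) := by
  rw [List.eraseIdx_eq_take_drop_succ, List.drop_append]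
  simp [Nat.le_of_lt h]

-- Invariant: when the processed prefix es.take i contains no "." or "..",
-- A's loop equals B's fold continued with stack = es.take i over es.drop i.
theorem dosNormpathLoopA_eq_foldl (i : Nat) (es : List String)
    (hle : i ≤ es.length)
    (hclean : ∀ x ∈ es.take i, x ≠ "." ∧ x ≠ "..") :
    dosNormpathLoopA i es = (es.drop i).foldl dosNormpathStep (es.take i) := by
  induction i, es using dosNormpathLoopA.induct with
  | case1 i es h heq ih =>
    -- es[i] = "."
    rw [dosNormpathLoopA]
    simp only [h, dif_pos, heq, if_pos]
    rw [ih (by rw [List.length_eraseIdx_of_lt h]; omega)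
        (by intro x hx; exact hclean x (take_eraseIdx_self es i h ▸ hx)),
      take_eraseIdx_self es i h, drop_eraseIdx_self es i h,
      List.drop_eq_getElem_cons h, List.foldl_cons]
    congr 1
    simp [dosNormpathStep, heq]
  | case2 i es h hne heq hpos ih =>
    -- es[i] = "..", i > 0
    rw [dosNormpathLoopA]
    simp only [h, dif_pos, hne, if_neg, heq, if_pos, hpos]
    have hlen1 : (es.eraseIdx i).length = es.length - 1 := List.length_eraseIdx_of_lt h
    have hi1 : i - 1 < (es.eraseIdx i).length := by omega
    have htk : ((es.eraseIdx i).eraseIdx (i-1)).take (i-1) = es.take (i-1) := by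
      rw [take_eraseIdx_self _ _ hi1]
      have : (es.eraseIdx i).take (i-1) = ((es.eraseIdx i).take i).take (i-1) := by
        rw [List.take_take, min_eq_left (by omega)]
      rw [this, take_eraseIdx_self es i h, List.take_take, min_eq_left (by omega)]
    have hdr : ((es.eraseIdx i).eraseIdx (i-1)).drop (i-1) = es.drop (i+1) := by
      rw [drop_eraseIdx_self _ _ hi1]
      have : i - 1 + 1 = i := by omega
      rw [this, drop_eraseIdx_self es i h]
    rw [ih (by rw [List.length_eraseIdx_of_lt hi1, hlen1]; omega)
        (by intro x hx
            rw [htk] at hx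
            have hx2 : x ∈ (es.take i).take (i-1) := by
              rw [List.take_take, min_eq_left (by omega)]; exact hx
            exact hclean x (List.mem_of_mem_take hx2)),
      htk, hdr, List.drop_eq_getElem_cons h, List.foldl_cons]
    congr 1
    have hsplit : es.take i = es.take (i-1) ++ [es[i-1]'(by omega)] := by
      obtain ⟨j, hj⟩ : ∃ j, i = j + 1 := ⟨i-1, by omega⟩
      subst hj
      simp only [Nat.add_sub_cancel]
      rw [List.take_succ]
      simp [List.getElem?_eq_getElem (by omega : j < es.length)]
    rw [hsplit]
    simp only [dosNormpathStep, heq, hne, if_neg, if_pos, List.dropLast_concat]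
    split_ifs with h1
    · exact absurd h1 (by simp)
    · rfl
  | case3 i es h hne heq hnpos ih =>
    -- es[i] = "..", i = 0
    have hi0 : i = 0 := by omega
    subst hi0
    rw [dosNormpathLoopA, dif_pos h, if_neg hne, if_pos heq, if_neg hnpos]
    rw [ih (by rw [List.length_eraseIdx_of_lt h]; omega) (by simp)]
    have he : es.eraseIdx 0 = es.drop 1 := by
      rw [List.eraseIdx_eq_take_drop_succ]; simp
    have hes : es = es[0] :: es.drop 1 := by
      simpa using List.drop_eq_getElem_cons h
    simp only [List.take_zero, List.drop_zero, he]
    conv_rhs => rw [hes]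
    rw [List.foldl_cons]
    simp [dosNormpathStep, heq, hne]
  | case4 i es h hne1 hne2 ih =>
    -- ordinary element
    have hsplit : es.take (i+1) = es.take i ++ [es[i]] := by
      rw [List.take_succ]
      simp [List.getElem?_eq_getElem h]
    rw [dosNormpathLoopA]
    simp only [h, dif_pos, hne1, if_neg, hne2, if_neg]
    rw [ih (by omega)
        (by intro x hx
            rw [hsplit, List.mem_append] at hx
            rcases hx with hx | hx
            · exact hclean x hx
            · simp at hx; subst hx; exact ⟨hne1, hne2⟩),
      List.drop_eq_getElem_cons h, List.foldl_cons, hsplit]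
    congr 1
    simp [dosNormpathStep, hne1, hne2]
  | case5 i es h =>
    rw [dosNormpathLoopA]
    simp only [h, dif_neg]
    have : i = es.length := by omega
    subst this
    simp

-- ===== VERDICT (by name: the statement is the Claim_ definition above) =====
theorem dos_normpath_spec : Claim_equal_dos_normpath := by
  intro elements _
  show dos_normpath elements = dos_normpath_alt elements
  unfold dos_normpath dos_normpath_alt
  rw [dosNormpathLoopA_eq_foldl 0 elements (by omega) (by simp)]
  simp
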